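-- pv_equiv track=rewrite | github.com/epilectrik/voynich | phases/TTDT_terminal_differentiation/middle_universality_test.py | decompose_token
-- ===== SOURCE A (Python) =====
-- PREFIXES = ['qo', 'ch', 'sh', 'da', 'ok', 'ot', 'ct', 'ol', 'lk', 'lch', 'yk', 'yt', 'ke', 'sa', 'so', 'al', 'op', 'lo']
--
-- SUFFIXES = [
--     'aiin', 'aiiin', 'ain', 'iin', 'in',
--     'ar', 'or', 'al', 'ol', 'am', 'an',
--     'dy', 'edy', 'eedy', 'chy', 'shy', 'ty', 'ky', 'ly', 'ry', 'y',
--     'r', 'l', 's', 'd', 'n', 'm'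
-- ]
--
-- def decompose_token(token):
--     """Extract MIDDLE from token."""
--     if not token or len(token) < 2:
--         return None
--     if token.startswith('[') or token.startswith('<') or '*' in token:
--         return None
--
--     rest = token
--     for p in sorted(PREFIXES, key=len, reverse=True):
--         if token.startswith(p):
--             rest = token[len(p):]
--             break
--
--     middle = rest
--     for s in sorted(SUFFIXES, key=len, reverse=True):
--         if rest.endswith(s) and len(rest) > len(s):
--             middle = rest[:-len(s)]
--             break
--
--     return middle if middle else None
-- ===== SOURCE B (Python) =====
-- PREFIXES = ['qo', 'ch', 'sh', 'da', 'ok', 'ot', 'ct', 'ol', 'lk', 'lch', 'yk', 'yt', 'ke', 'sa', 'so', 'al', 'op', 'lo']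
--
-- SUFFIXES = [
--     'aiin', 'aiiin', 'ain', 'iin', 'in',
--     'ar', 'or', 'al', 'ol', 'am', 'an',
--     'dy', 'edy', 'eedy', 'chy', 'shy', 'ty', 'ky', 'ly', 'ry', 'y',
--     'r', 'l', 's', 'd', 'n', 'm'
-- ]
--
--
-- def _by_length(words):
--     """Group words into sets keyed by their length."""
--     table = {}
--     for w in words:
--         table.setdefault(len(w), set()).add(w)
--     return table
--
--
-- _P_TABLE = _by_length(PREFIXES)
-- _P_LENS = sorted(_P_TABLE, reverse=True)
-- _S_TABLE = _by_length(SUFFIXES)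
-- _S_LENS = sorted(_S_TABLE, reverse=True)
--
--
-- def decompose_token(token):
--     """Extract MIDDLE from token."""
--     if not token or len(token) < 2:
--         return None
--     if token.startswith('[') or token.startswith('<') or '*' in token:
--         return None
--
--     rest = token
--     for k in _P_LENS:
--         if token[:k] in _P_TABLE[k]:
--             rest = token[k:]
--             break
--
--     middle = rest
--     for k in _S_LENS:
--         if k < len(rest) and rest[-k:] in _S_TABLE[k]:
--             middle = rest[:-k]
--             break
--
--     return middle if middle else None
-- ===== Notes on version B (the rewrite author's own statement) =====
-- stated objective: alternative
-- what changed: Instead of scanning a length-sorted list of affixes with startswith/endswith, B precomputes length-grouped hash sets once and for each candidate length tests the single token slice of that length for set membership.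
import Mathlib
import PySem

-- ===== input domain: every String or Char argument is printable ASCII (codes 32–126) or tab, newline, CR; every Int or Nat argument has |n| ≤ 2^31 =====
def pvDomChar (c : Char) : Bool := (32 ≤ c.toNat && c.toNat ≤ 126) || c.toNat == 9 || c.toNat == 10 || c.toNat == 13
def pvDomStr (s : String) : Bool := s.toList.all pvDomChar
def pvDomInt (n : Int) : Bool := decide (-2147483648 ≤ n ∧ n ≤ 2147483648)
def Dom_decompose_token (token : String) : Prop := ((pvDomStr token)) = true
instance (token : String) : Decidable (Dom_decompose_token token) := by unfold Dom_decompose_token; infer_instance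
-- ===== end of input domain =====

-- B replaces the per-affix startswith/endswith scan of a length-sorted list by length-grouped
-- sets built once: for each candidate length it tests the one slice of that length for membership.


-- ===== PORT A =====
def pvPREFIXES : List (List Char) :=
  ["qo".toList, "ch".toList, "sh".toList, "da".toList, "ok".toList, "ot".toList,
   "ct".toList, "ol".toList, "lk".toList, "lch".toList, "yk".toList, "yt".toList,
   "ke".toList, "sa".toList, "so".toList, "al".toList, "op".toList, "lo".toList]

def pvSUFFIXES : List (List Char) :=
  ["aiin".toList, "aiiin".toList, "ain".toList, "iin".toList, "in".toList,
   "ar".toList, "or".toList, "al".toList, "ol".toList, "am".toList, "an".toList,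
   "dy".toList, "edy".toList, "eedy".toList, "chy".toList, "shy".toList, "ty".toList,
   "ky".toList, "ly".toList, "ry".toList, "y".toList,
   "r".toList, "l".toList, "s".toList, "d".toList, "n".toList, "m".toList]

-- for p in sorted(PREFIXES, …): if token.startswith(p): rest = token[len(p):]; break
def pvLoopP : List (List Char) → List Char → List Char
  | [], tok => tok
  | p :: ps, tok =>
      if PySem.Chars.startswith tok p then PySem.Chars.slice tok (some (p.length : Int)) none
      else pvLoopP ps tok

-- for s in sorted(SUFFIXES, …): if rest.endswith(s) and len(rest) > len(s): middle = rest[:-len(s)]; break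
def pvLoopS : List (List Char) → List Char → List Char
  | [], r => r
  | s :: ss, r =>
      if PySem.Chars.endswith r s && decide (r.length > s.length) then
        PySem.Chars.slice r none (some (-(s.length : Int)))
      else pvLoopS ss r

def decompose_token (token : String) : Option String :=
  let t := token.toList
  if t = [] ∨ t.length < 2 then none
  else if PySem.Chars.startswith t ['['] || PySem.Chars.startswith t ['<'] || PySem.Chars.isIn ['*'] t then none
  else
    let rest := pvLoopP (PySem.List.sorted pvPREFIXES (fun p => p.length) true) t
    let middle := pvLoopS (PySem.List.sorted pvSUFFIXES (fun s => s.length) true) rest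
    if middle = [] then none else some (String.ofList middle)

-- ===== PORT B =====
-- table.setdefault(len(w), set()).add(w)
def pvByLength (words : List (List Char)) : PySem.Dict Int (PySem.Set (List Char)) :=
  words.foldl (fun d w => d.modify (w.length : Int) PySem.Set.empty (fun s => PySem.Set.add s w)) PySem.Dict.empty

def pvPTable : PySem.Dict Int (PySem.Set (List Char)) := pvByLength pvPREFIXES
def pvPLens : List Int := PySem.List.sorted pvPTable.keys (fun k => k) true
def pvSTable : PySem.Dict Int (PySem.Set (List Char)) := pvByLength pvSUFFIXES
def pvSLens : List Int := PySem.List.sorted pvSTable.keys (fun k => k) true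

-- for k in _P_LENS: if token[:k] in _P_TABLE[k]: rest = token[k:]; break
-- (_P_TABLE[k] ported as getD with an empty-set default: every k drawn from _P_LENS is a key, so exact)
def pvStripP : List Int → List Char → List Char
  | [], tok => tok
  | k :: ks, tok =>
      if PySem.Set.contains (pvPTable.getD k PySem.Set.empty) (PySem.Chars.slice tok none (some k)) then
        PySem.Chars.slice tok (some k) none
      else pvStripP ks tok

-- for k in _S_LENS: if k < len(rest) and rest[-k:] in _S_TABLE[k]: middle = rest[:-k]; break
def pvStripS : List Int → List Char → List Char
  | [], r => r
  | k :: ks, r =>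
      if decide (k < (r.length : Int)) && PySem.Set.contains (pvSTable.getD k PySem.Set.empty) (PySem.Chars.slice r (some (-k)) none) then
        PySem.Chars.slice r none (some (-k))
      else pvStripS ks r

def decompose_token_alt (token : String) : Option String :=
  let t := token.toList
  if t = [] ∨ t.length < 2 then none
  else if PySem.Chars.startswith t ['['] || PySem.Chars.startswith t ['<'] || PySem.Chars.isIn ['*'] t then none
  else
    let rest := pvStripP pvPLens t
    let middle := pvStripS pvSLens rest
    if middle = [] then none else some (String.ofList middle)

-- ===== PRECONDITION & SPEC =====
def Spec_decompose_token (token : String) (out : Option String) : Prop := out = decompose_token_alt token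
instance (token : String) (out : Option String) : Decidable (Spec_decompose_token token out) := by unfold Spec_decompose_token; infer_instance

-- ===== CLAIM (what is proved, stated in full; the proofs are below) =====
def Claim_equal_decompose_token : Prop := ∀ (token : String), Dom_decompose_token token → Spec_decompose_token token (decompose_token token)


-- ===== LEMMAS AND PROOFS =====

-- length groups of the two affix lists (A's stable length-sort concatenates them; B's table maps each length to one of them)
def pvG3 : List (List Char) := ["lch".toList]
def pvG2 : List (List Char) :=
  ["qo".toList, "ch".toList, "sh".toList, "da".toList, "ok".toList, "ot".toList,
   "ct".toList, "ol".toList, "lk".toList, "yk".toList, "yt".toList,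
   "ke".toList, "sa".toList, "so".toList, "al".toList, "op".toList, "lo".toList]
def pvS5 : List (List Char) := ["aiiin".toList]
def pvS4 : List (List Char) := ["aiin".toList, "eedy".toList]
def pvS3 : List (List Char) := ["ain".toList, "iin".toList, "edy".toList, "chy".toList, "shy".toList]
def pvS2 : List (List Char) :=
  ["in".toList, "ar".toList, "or".toList, "al".toList, "ol".toList, "am".toList,
   "an".toList, "dy".toList, "ty".toList, "ky".toList, "ly".toList, "ry".toList]
def pvS1 : List (List Char) :=
  ["y".toList, "r".toList, "l".toList, "s".toList, "d".toList, "n".toList, "m".toList]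

theorem pvLoopP_group (ps rest' : List (List Char)) (n : Nat) (h : ∀ p ∈ ps, p.length = n) (t : List Char) :
    pvLoopP (ps ++ rest') t =
      if ps.any (fun p => PySem.Chars.startswith t p) then PySem.Chars.slice t (some (n : Int)) none
      else pvLoopP rest' t := by
  induction ps with
  | nil => simp
  | cons p ps ih =>
    simp only [List.cons_append, pvLoopP, List.any_cons]
    by_cases hp : PySem.Chars.startswith t p
    · simp [hp, h p (by simp)]
    · simp [hp, ih (fun q hq => h q (by simp [hq]))]

theorem pvLoopP_last (ps : List (List Char)) (n : Nat) (h : ∀ p ∈ ps, p.length = n) (t : List Char) :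
    pvLoopP ps t =
      if ps.any (fun p => PySem.Chars.startswith t p) then PySem.Chars.slice t (some (n : Int)) none
      else t := by
  have := pvLoopP_group ps [] n h t
  simpa using this

theorem pvLoopS_group (ss rest' : List (List Char)) (n : Nat) (h : ∀ s ∈ ss, s.length = n) (r : List Char) :
    pvLoopS (ss ++ rest') r =
      if ss.any (fun s => PySem.Chars.endswith r s && decide (r.length > s.length)) then
        PySem.Chars.slice r none (some (-(n : Int)))
      else pvLoopS rest' r := by
  induction ss with
  | nil => simp
  | cons s ss ih =>
    simp only [List.cons_append, pvLoopS, List.any_cons]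
    by_cases hs : (PySem.Chars.endswith r s && decide (r.length > s.length)) = true
    · rw [if_pos hs, if_pos (by simp [hs]), h s (by simp)]
    · simp [hs, ih (fun q hq => h q (by simp [hq]))]

theorem pvLoopS_last (ss : List (List Char)) (n : Nat) (h : ∀ s ∈ ss, s.length = n) (r : List Char) :
    pvLoopS ss r =
      if ss.any (fun s => PySem.Chars.endswith r s && decide (r.length > s.length)) then
        PySem.Chars.slice r none (some (-(n : Int)))
      else r := by
  have := pvLoopS_group ss [] n h r
  simpa using this

theorem prefix_cond_eq (ps : List (List Char)) (n : Nat) (h : ∀ p ∈ ps, p.length = n) (t : List Char) :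
    ps.any (fun p => PySem.Chars.startswith t p) = decide (t.take n ∈ ps) := by
  rw [Bool.eq_iff_iff]
  simp only [List.any_eq_true, decide_eq_true_eq, PySem.Chars.startswith_iff]
  constructor
  · rintro ⟨p, hp, hpre⟩
    rw [List.prefix_iff_eq_take, h p hp] at hpre
    rwa [← hpre]
  · intro hm
    exact ⟨t.take n, hm, by rw [List.prefix_iff_eq_take, h _ hm]⟩

theorem suffix_cond_eq (ss : List (List Char)) (n : Nat) (h : ∀ s ∈ ss, s.length = n) (r : List Char) :
    ss.any (fun s => PySem.Chars.endswith r s && decide (r.length > s.length)) =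
      (decide ((n : Int) < (r.length : Int)) && decide (r.drop (r.length - n) ∈ ss)) := by
  rw [Bool.eq_iff_iff]
  simp only [List.any_eq_true, Bool.and_eq_true, decide_eq_true_eq, PySem.Chars.endswith_iff]
  constructor
  · rintro ⟨s, hs, hsuf, hlt⟩
    have hl := h s hs
    rw [List.suffix_iff_eq_drop, hl] at hsuf
    refine ⟨by exact_mod_cast (hl ▸ hlt), by rwa [← hsuf]⟩
  · rintro ⟨hlt, hm⟩
    have hn : n < r.length := by exact_mod_cast hlt
    refine ⟨r.drop (r.length - n), hm, List.drop_suffix _ _, ?_⟩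
    have hl := h _ hm
    omega

theorem core_prefix (t : List Char) :
    pvLoopP (PySem.List.sorted pvPREFIXES (fun p => p.length) true) t = pvStripP pvPLens t := by
  rw [show PySem.List.sorted pvPREFIXES (fun p => p.length) true = pvG3 ++ pvG2 from by decide]
  rw [pvLoopP_group pvG3 pvG2 3 (by decide), pvLoopP_last pvG2 2 (by decide)]
  rw [prefix_cond_eq pvG3 3 (by decide), prefix_cond_eq pvG2 2 (by decide)]
  rw [show pvPLens = [3, 2] from by decide]
  simp only [pvStripP]
  rw [show pvPTable.getD 3 PySem.Set.empty = pvG3 from by decide,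
      show pvPTable.getD 2 PySem.Set.empty = pvG2 from by decide]
  simp [PySem.Set.contains, PySem.List.slice_to]

theorem core_suffix (r : List Char) :
    pvLoopS (PySem.List.sorted pvSUFFIXES (fun s => s.length) true) r = pvStripS pvSLens r := by
  rw [show PySem.List.sorted pvSUFFIXES (fun s => s.length) true = pvS5 ++ (pvS4 ++ (pvS3 ++ (pvS2 ++ pvS1))) from by decide]
  rw [pvLoopS_group pvS5 _ 5 (by decide), pvLoopS_group pvS4 _ 4 (by decide),
      pvLoopS_group pvS3 _ 3 (by decide), pvLoopS_group pvS2 _ 2 (by decide),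
      pvLoopS_last pvS1 1 (by decide)]
  rw [suffix_cond_eq pvS5 5 (by decide), suffix_cond_eq pvS4 4 (by decide),
      suffix_cond_eq pvS3 3 (by decide), suffix_cond_eq pvS2 2 (by decide),
      suffix_cond_eq pvS1 1 (by decide)]
  rw [show pvSLens = [5, 4, 3, 2, 1] from by decide]
  simp only [pvStripS]
  rw [show pvSTable.getD 5 PySem.Set.empty = pvS5 from by decide,
      show pvSTable.getD 4 PySem.Set.empty = pvS4 from by decide,
      show pvSTable.getD 3 PySem.Set.empty = pvS3 from by decide,
      show pvSTable.getD 2 PySem.Set.empty = pvS2 from by decide,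
      show pvSTable.getD 1 PySem.Set.empty = pvS1 from by decide]
  simp [PySem.Set.contains]
  rw [PySem.List.slice_from_neg_ofNat r 5 (by omega), PySem.List.slice_from_neg_ofNat r 4 (by omega),
      PySem.List.slice_from_neg_ofNat r 3 (by omega), PySem.List.slice_from_neg_ofNat r 2 (by omega),
      PySem.List.slice_from_neg_one r]

-- ===== VERDICT (by name: the statement is the Claim_ definition above) =====
theorem decompose_token_spec : Claim_equal_decompose_token := by
  intro token _dom
  unfold Spec_decompose_token decompose_token decompose_token_alt
  simp only [core_prefix, core_suffix]
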